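-- pv_equiv track=rewrite | github.com/OCHA-DAP/HDX_data_series | tag_hash_analysis.py | regroupOnName
-- ===== SOURCE A (Python) =====
-- def regroupOnName(series):
-- 	output = {}
-- 	for row in series:
-- 		seriesValue = row[1]+' '+row[0]
-- 		if seriesValue in output:
-- 			output[seriesValue][1] = output[seriesValue][1] + ' & ' + row[1]
-- 			output[seriesValue][2] = output[seriesValue][2] + ' & ' + row[2]
-- 			output[seriesValue][3] = output[seriesValue][3] + ' & ' + row[3]
-- 			output[seriesValue][4] = output[seriesValue][4] + row[4]
-- 		else:
-- 			output[seriesValue] = row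
--
-- 	outputseries = []
-- 	for key in output:
-- 		outputseries.append(output[key])
-- 	return outputseries
-- ===== SOURCE B (Python) =====
-- def regroupOnName(series):
-- 	# group rows by key, then combine each group once (join/concat) onto its first row
-- 	groups = {}
-- 	for row in series:
-- 		groups.setdefault(row[1] + ' ' + row[0], []).append(row)
-- 	out = []
-- 	for rows in groups.values():
-- 		first = rows[0]
-- 		if len(rows) > 1:
-- 			first[1] = ' & '.join(r[1] for r in rows)
-- 			first[2] = ' & '.join(r[2] for r in rows)
-- 			first[3] = ' & '.join(r[3] for r in rows)
-- 			first[4] = ''.join(r[4] for r in rows)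
-- 		out.append(first)
-- 	return out
-- ===== Notes on version B (the rewrite author's own statement) =====
-- stated objective: idiomatic
-- what changed: B first groups rows into lists keyed by row[1]+' '+row[0] (dict of groups built with setdefault), then combines each group in one pass with ' & '.join / ''.join onto its first row, instead of A's incremental field-by-field concatenation into the dict on every duplicate hit.
import Mathlib
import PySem

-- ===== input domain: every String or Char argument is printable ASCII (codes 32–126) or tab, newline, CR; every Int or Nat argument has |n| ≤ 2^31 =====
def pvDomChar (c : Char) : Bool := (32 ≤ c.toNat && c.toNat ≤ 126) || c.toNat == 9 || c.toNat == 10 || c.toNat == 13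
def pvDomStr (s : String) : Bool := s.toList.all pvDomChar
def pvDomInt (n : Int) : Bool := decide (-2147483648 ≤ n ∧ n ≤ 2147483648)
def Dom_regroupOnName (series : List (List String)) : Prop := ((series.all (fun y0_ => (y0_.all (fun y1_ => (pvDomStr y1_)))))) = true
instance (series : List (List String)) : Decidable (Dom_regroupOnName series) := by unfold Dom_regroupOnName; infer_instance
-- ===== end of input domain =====

-- B groups rows by key once and combines each group with a single join/concat pass (idiomatic
-- collect-then-reduce) instead of A's incremental in-dict concatenation; equivalence is about the
-- return value (both Pythons mutate the first-seen row of each group in place).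

-- key of a row, row[1] + ' ' + row[0]  (shared by both ports)
def rowKey (row : List String) : String :=
  PySem.List.pyGetD row 1 "" ++ " " ++ PySem.List.pyGetD row 0 ""

-- ===== PORT A =====
-- body of A's first loop: update-or-insert, the four sequential item assignments kept sequential
def stepA (d : PySem.Dict String (List String)) (row : List String) :
    PySem.Dict String (List String) :=
  let seriesValue := rowKey row
  if d.contains seriesValue then
    let d1 := d.modify seriesValue []
      (fun cur => cur.set 1 (PySem.List.pyGetD cur 1 "" ++ " & " ++ PySem.List.pyGetD row 1 ""))
    let d2 := d1.modify seriesValue []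
      (fun cur => cur.set 2 (PySem.List.pyGetD cur 2 "" ++ " & " ++ PySem.List.pyGetD row 2 ""))
    let d3 := d2.modify seriesValue []
      (fun cur => cur.set 3 (PySem.List.pyGetD cur 3 "" ++ " & " ++ PySem.List.pyGetD row 3 ""))
    d3.modify seriesValue []
      (fun cur => cur.set 4 (PySem.List.pyGetD cur 4 "" ++ PySem.List.pyGetD row 4 ""))
  else d.insert seriesValue row

def regroupOnName (series : List (List String)) : List (List String) :=
  let output := series.foldl stepA PySem.Dict.empty
  output.keys.map (fun key => output.getD key [])

-- ===== PORT B =====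
-- body of B's second loop: combine one group onto its first row
def bcomb (rows : List (List String)) : List String :=
  let first := rows.headD []
  if 1 < rows.length then
    (((first.set 1 (PySem.Str.join " & " (rows.map (fun r => PySem.List.pyGetD r 1 "")))).set 2
        (PySem.Str.join " & " (rows.map (fun r => PySem.List.pyGetD r 2 "")))).set 3
        (PySem.Str.join " & " (rows.map (fun r => PySem.List.pyGetD r 3 "")))).set 4
        (PySem.Str.join "" (rows.map (fun r => PySem.List.pyGetD r 4 "")))
  else first

def regroupOnName_alt (series : List (List String)) : List (List String) :=
  let groups := series.foldl
    (fun d row => d.modify (rowKey row) [] (fun g => g ++ [row])) PySem.Dict.empty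
  groups.values.map bcomb

-- ===== PRECONDITION & SPEC =====
-- Pre_ excludes exactly the inputs where the Python A raises IndexError: a row shorter than 2
-- (row[0]/row[1] unreadable), or a row in a repeated-key group shorter than 5 (fields 1..4 are
-- read and assigned there).
def Pre_regroupOnName (series : List (List String)) : Prop :=
  ∀ row ∈ series, 2 ≤ row.length ∧
    (1 < series.countP (fun r => rowKey r == rowKey row) → 5 ≤ row.length)
instance (series : List (List String)) : Decidable (Pre_regroupOnName series) := by
  unfold Pre_regroupOnName; infer_instance

def pvWitness_regroupOnName : List (List String) :=
  [["a", "b", "c", "d", "e"], ["a", "b", "C", "D", "E"], ["z", "y", "q"]]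

def Spec_regroupOnName (series : List (List String)) (out : List (List String)) : Prop :=
  out = regroupOnName_alt series
instance (series : List (List String)) (out : List (List String)) :
    Decidable (Spec_regroupOnName series out) := by unfold Spec_regroupOnName; infer_instance

-- ===== CLAIM (what is proved, stated in full; the proofs are below) =====
def Claim_equal_regroupOnName : Prop := ∀ (series : List (List String)),
  Dom_regroupOnName series → Pre_regroupOnName series →
    Spec_regroupOnName series (regroupOnName series)

-- ===== LEMMAS AND PROOFS =====

-- the net effect of A's four sequential assignments on a stored group row
def aupd (cur row : List String) : List String :=
  let c1 := cur.set 1 (PySem.List.pyGetD cur 1 "" ++ " & " ++ PySem.List.pyGetD row 1 "")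
  let c2 := c1.set 2 (PySem.List.pyGetD c1 2 "" ++ " & " ++ PySem.List.pyGetD row 2 "")
  let c3 := c2.set 3 (PySem.List.pyGetD c2 3 "" ++ " & " ++ PySem.List.pyGetD row 3 "")
  c3.set 4 (PySem.List.pyGetD c3 4 "" ++ PySem.List.pyGetD row 4 "")

-- the row A's dict holds for a group, as a function of the group's rows
def acomb (rows : List (List String)) : List String :=
  match rows with
  | [] => []
  | f :: rest => rest.foldl aupd f

-- A's dict as the image of B's groups dict
def mapComb (d : PySem.Dict String (List (List String))) : PySem.Dict String (List String) :=
  PySem.Dict.mk (d.items.map (fun p => (p.1, acomb p.2)))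

def stepB (d : PySem.Dict String (List (List String))) (row : List String) :
    PySem.Dict String (List (List String)) :=
  d.modify (rowKey row) [] (fun g => g ++ [row])

-- the join/concat form bcomb produces, on an explicit first row
def fform (first : List String) (rows : List (List String)) : List String :=
  (((first.set 1 (PySem.Str.join " & " (rows.map (fun r => PySem.List.pyGetD r 1 "")))).set 2
      (PySem.Str.join " & " (rows.map (fun r => PySem.List.pyGetD r 2 "")))).set 3
      (PySem.Str.join " & " (rows.map (fun r => PySem.List.pyGetD r 3 "")))).set 4
      (PySem.Str.join "" (rows.map (fun r => PySem.List.pyGetD r 4 "")))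

lemma dict_ext {κ ν : Type} (d₁ d₂ : PySem.Dict κ ν) (h : d₁.items = d₂.items) : d₁ = d₂ := by
  cases d₁; cases d₂; simpa using h

lemma getD_set_ne (l : List String) (v : String) {i j : Nat} (h : i ≠ j) :
    (l.set i v).getD j "" = l.getD j "" := by
  simp [List.getD, h]

lemma set_getD_self (l : List String) (i : Nat) : l.set i (l[i]?.getD "") = l := by
  by_cases h : i < l.length
  · simp [List.getElem?_eq_getElem h]
  · exact List.set_eq_of_length_le (Nat.le_of_not_lt h)

lemma intercalate_append_singleton (s : List Char) (xs : List (List Char)) (x : List Char)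
    (h : xs ≠ []) : List.intercalate s (xs ++ [x]) = List.intercalate s xs ++ s ++ x := by
  induction xs with
  | nil => simp at h
  | cons a t ih =>
    cases t with
    | nil => simp [List.intercalate]
    | cons b u =>
      have := ih (by simp)
      simp [List.intercalate] at this ⊢
      simp [this]

lemma join_append_singleton (sep : String) (xs : List String) (x : String) (h : xs ≠ []) :
    PySem.Str.join sep (xs ++ [x]) = PySem.Str.join sep xs ++ sep ++ x := by
  have h' : xs.map String.toList ≠ [] := by simpa using h
  apply String.toList_injective
  simp only [PySem.Str.join, PySem.Chars.join, String.toList_append, String.toList_ofList,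
    List.map_append, List.map_cons, List.map_nil]
  rw [intercalate_append_singleton _ _ _ h']

lemma join_singleton (sep x : String) : PySem.Str.join sep [x] = x := by
  simp [PySem.Str.join]

-- characterisation of fform's fields
lemma length_fform (first : List String) (rows : List (List String)) :
    (fform first rows).length = first.length := by simp [fform]

lemma getD_fform (first : List String) (rows : List (List String)) (i : Nat) :
    (fform first rows).getD i "" =
      if i < first.length then
        if i = 1 then PySem.Str.join " & " (rows.map (fun r => PySem.List.pyGetD r 1 ""))
        else if i = 2 then PySem.Str.join " & " (rows.map (fun r => PySem.List.pyGetD r 2 ""))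
        else if i = 3 then PySem.Str.join " & " (rows.map (fun r => PySem.List.pyGetD r 3 ""))
        else if i = 4 then PySem.Str.join "" (rows.map (fun r => PySem.List.pyGetD r 4 ""))
        else first.getD i ""
      else "" := by
  simp only [fform, List.getD, List.getElem?_set, List.length_set]
  by_cases h1 : i = 1 <;> by_cases h2 : i = 2 <;> by_cases h3 : i = 3 <;> by_cases h4 : i = 4 <;>
    by_cases hl : i < first.length <;>
    simp_all <;> split_ifs <;> simp_all

lemma fform_self (first : List String) : fform first [first] = first := by
  simp [fform, join_singleton, PySem.List.pyGetD_ofNat', set_getD_self]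

lemma getD_set (l : List String) (v : String) (i j : Nat) :
    (l.set i v).getD j "" = if i = j ∧ j < l.length then v else l.getD j "" := by
  simp only [List.getD, List.getElem?_set]
  split_ifs <;> simp_all

lemma aupd_fform (first : List String) (rows : List (List String)) (r : List String)
    (h : rows ≠ []) : aupd (fform first rows) r = fform first (rows ++ [r]) := by
  have hj : ∀ g : List String → String, ∀ sep : String,
      PySem.Str.join sep ((rows ++ [r]).map g) =
        PySem.Str.join sep (rows.map g) ++ sep ++ g r := by
    intro g sep
    rw [List.map_append, List.map_singleton, join_append_singleton _ _ _ (by simpa using h)]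
  apply List.ext_getElem (by simp [aupd, fform, List.length_set])
  intro i h₁ h₂
  have hg : ∀ (l : List String) (j : Nat) (hj : j < l.length), l[j] = l.getD j "" := by
    intro l j hjj; simp [List.getD, List.getElem?_eq_getElem hjj]
  rw [hg _ _ h₁, hg _ _ h₂]
  have hi : i < first.length := by simpa [aupd, fform, List.length_set] using h₁
  simp only [aupd, PySem.List.pyGetD_ofNat',
    getD_set_ne _ _ (by decide : (1:Nat) ≠ 2),
    getD_set_ne _ _ (by decide : (1:Nat) ≠ 3),
    getD_set_ne _ _ (by decide : (2:Nat) ≠ 3),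
    getD_set_ne _ _ (by decide : (1:Nat) ≠ 4),
    getD_set_ne _ _ (by decide : (2:Nat) ≠ 4),
    getD_set_ne _ _ (by decide : (3:Nat) ≠ 4)]
  simp only [getD_set, List.length_set, length_fform, getD_fform, hj]
  by_cases h1 : i = 1 <;> by_cases h2 : i = 2 <;> by_cases h3 : i = 3 <;> by_cases h4 : i = 4 <;>
    simp_all [List.getD, PySem.List.pyGetD_ofNat'] <;> (try split_ifs <;> simp_all)

lemma foldl_aupd_eq_fform (rest : List (List String)) (first : List String) :
    rest.foldl aupd first = fform first (first :: rest) := by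
  induction rest using List.reverseRecOn with
  | nil => simp [fform_self]
  | append_singleton rs r ih =>
    rw [List.foldl_append]
    simp only [List.foldl_cons, List.foldl_nil, ih]
    rw [aupd_fform first (first :: rs) r (by simp), List.cons_append]

lemma acomb_eq_bcomb (rows : List (List String)) (h : rows ≠ []) : acomb rows = bcomb rows := by
  match rows with
  | f :: rest =>
    cases rest with
    | nil => simp [acomb, bcomb]
    | cons a t =>
      simp only [acomb, foldl_aupd_eq_fform]
      simp [bcomb, fform]

-- mapComb commutes with the dict operations
lemma contains_mapComb (d : PySem.Dict String (List (List String))) (k : String) :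
    (mapComb d).contains k = d.contains k := by
  simp [mapComb, PySem.Dict.contains, Function.comp_def]

lemma get?_mk_map (l : List (String × List (List String))) (k : String) :
    (PySem.Dict.mk (l.map (fun p => (p.1, acomb p.2)))).get? k =
      ((PySem.Dict.mk l).get? k).map acomb := by
  induction l with
  | nil => simp [PySem.Dict.get?]
  | cons p t ih =>
    obtain ⟨a, v⟩ := p
    simp only [List.map_cons, PySem.Dict.get?_mk_cons]
    by_cases h : a == k
    · simp [h]
    · simp only [h]; exact ih

lemma get?_mapComb (d : PySem.Dict String (List (List String))) (k : String) :
    (mapComb d).get? k = (d.get? k).map acomb := by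
  obtain ⟨l⟩ := d
  exact get?_mk_map l k

lemma getD_mapComb (d : PySem.Dict String (List (List String))) (k : String) :
    (mapComb d).getD k [] = acomb (d.getD k []) := by
  simp only [PySem.Dict.getD, get?_mapComb]
  cases d.get? k with
  | none => simp [acomb]
  | some v => simp

lemma insert_mapComb (d : PySem.Dict String (List (List String))) (k : String)
    (v : List (List String)) :
    mapComb (d.insert k v) = (mapComb d).insert k (acomb v) := by
  apply dict_ext
  by_cases hc : d.contains k
  · rw [PySem.Dict.items_insert_of_contains _ _ (by rw [contains_mapComb]; exact hc)]
    have : (mapComb (d.insert k v)).items = (d.insert k v).items.map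
        (fun p => (p.1, acomb p.2)) := rfl
    rw [this, PySem.Dict.items_insert_of_contains _ _ hc]
    simp only [mapComb, List.map_map]
    apply List.map_congr_left
    intro p _
    by_cases hp : p.1 = k <;> simp [hp]
  · have hcf : d.contains k = false := by simpa using hc
    rw [PySem.Dict.items_insert_of_not_contains _ _ (by rw [contains_mapComb]; exact hcf)]
    have : (mapComb (d.insert k v)).items = (d.insert k v).items.map
        (fun p => (p.1, acomb p.2)) := rfl
    rw [this, PySem.Dict.items_insert_of_not_contains _ _ hcf]
    simp [mapComb]

lemma keys_mapComb (d : PySem.Dict String (List (List String))) :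
    (mapComb d).keys = d.keys := by
  simp [mapComb, PySem.Dict.keys]

lemma getD_mem_values (d : PySem.Dict String (List (List String))) (k : String)
    (hc : d.contains k = true) : d.getD k [] ∈ d.values := by
  rw [PySem.Dict.contains_eq_isSome_get?] at hc
  cases hv : d.get? k with
  | none => rw [hv] at hc; simp at hc
  | some v =>
    have : (k, v) ∈ d.items := PySem.Dict.mem_items_of_get?_eq_some d hv
    have : v ∈ d.values := by simp [PySem.Dict.values]; exact ⟨k, this⟩
    simpa [PySem.Dict.getD, hv] using this

-- one step of the two loops, related
lemma stepA_mapComb (d : PySem.Dict String (List (List String))) (row : List String)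
    (hne : ∀ v ∈ d.values, v ≠ []) :
    stepA (mapComb d) row = mapComb (stepB d row) := by
  by_cases hc : d.contains (rowKey row)
  · have hrowsne : d.getD (rowKey row) [] ≠ [] := hne _ (getD_mem_values d _ hc)
    obtain ⟨f, rest, hfr⟩ : ∃ f rest, d.getD (rowKey row) [] = f :: rest := by
      cases hx : d.getD (rowKey row) [] with
      | nil => exact absurd hx hrowsne
      | cons f rest => exact ⟨f, rest, rfl⟩
    have hc' : (mapComb d).contains (rowKey row) = true := by rw [contains_mapComb]; exact hc
    simp only [stepA, stepB, hc', if_true, PySem.Dict.modify,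
      PySem.Dict.getD_insert_self, PySem.Dict.insert_insert_self]
    rw [insert_mapComb, getD_mapComb]
    congr 1
    rw [hfr]
    show _ = acomb ((f :: rest) ++ [row])
    simp only [acomb, List.cons_append, List.foldl_append, List.foldl_cons, List.foldl_nil]
    rfl
  · have hcf : d.contains (rowKey row) = false := by simpa using hc
    have hc' : (mapComb d).contains (rowKey row) = false := by rw [contains_mapComb]; exact hcf
    simp only [stepA, stepB, hc', Bool.false_eq_true, if_false, PySem.Dict.modify,
      PySem.Dict.getD_of_not_contains _ _ hcf, List.nil_append]
    rw [insert_mapComb]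
    rfl

-- the loop invariant over the whole series
lemma fold_eq (series : List (List String)) :
    ∀ (d : PySem.Dict String (List (List String))), (∀ v ∈ d.values, v ≠ []) →
      (∀ v ∈ (series.foldl stepB d).values, v ≠ []) ∧
      series.foldl stepA (mapComb d) = mapComb (series.foldl stepB d) := by
  induction series with
  | nil => intro d h; exact ⟨h, rfl⟩
  | cons row t ih =>
    intro d h
    have hstep : ∀ v ∈ (stepB d row).values, v ≠ [] := by
      intro v hv
      simp only [stepB, PySem.Dict.modify] at hv
      rcases PySem.Dict.mem_values_insert _ _ _ _ hv with h1 | h1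
      · subst h1; simp
      · exact h v h1
    have := ih (stepB d row) hstep
    refine ⟨this.1, ?_⟩
    simp only [List.foldl_cons, stepA_mapComb d row h, this.2]

-- nodup keys of B's fold
lemma nodup_keys_foldB (series : List (List String)) :
    ∀ (d : PySem.Dict String (List (List String))), d.keys.Nodup →
      (series.foldl stepB d).keys.Nodup := by
  induction series with
  | nil => intro d h; exact h
  | cons row t ih =>
    intro d h
    exact ih _ (PySem.Dict.nodup_keys_insert _ _ _ h)

-- A's output loop over keys equals values, given unique keys
lemma map_getD_keys (l : List (String × List String)) (h : (l.map Prod.fst).Nodup) :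
    (l.map Prod.fst).map (fun k => (PySem.Dict.mk l).getD k []) = l.map Prod.snd := by
  induction l with
  | nil => simp
  | cons p t ih =>
    obtain ⟨a, v⟩ := p
    simp only [List.map_cons, List.nodup_cons] at h ⊢
    obtain ⟨hnot, hnd⟩ := h
    congr 1
    · simp [PySem.Dict.getD, PySem.Dict.get?_mk_cons]
    · rw [← ih hnd]
      apply List.map_congr_left
      intro k hk
      have hak : ¬ ((a == k) = true) := by
        intro hh
        exact hnot (by rw [beq_iff_eq] at hh; rw [hh]; exact hk)
      simp [PySem.Dict.getD, PySem.Dict.get?_mk_cons, hak]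

-- ===== VERDICT (by name: the statement is the Claim_ definition above) =====
theorem regroupOnName_spec : Claim_equal_regroupOnName := by
  intro series _ _
  show (series.foldl stepA PySem.Dict.empty).keys.map
      (fun key => (series.foldl stepA PySem.Dict.empty).getD key []) =
    (series.foldl stepB PySem.Dict.empty).values.map bcomb
  have hmc : (PySem.Dict.empty : PySem.Dict String (List String)) = mapComb PySem.Dict.empty := rfl
  have hfold := fold_eq series PySem.Dict.empty (by simp [PySem.Dict.values, PySem.Dict.empty])
  rw [hmc, hfold.2]
  set dB := series.foldl stepB PySem.Dict.empty with hdB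
  have hnodup : dB.keys.Nodup :=
    nodup_keys_foldB series PySem.Dict.empty (by simp [PySem.Dict.keys, PySem.Dict.empty])
  have hkeys : (mapComb dB).keys = dB.keys := keys_mapComb dB
  have hvals := map_getD_keys (mapComb dB).items (by
    have h2 : (mapComb dB).keys = (mapComb dB).items.map Prod.fst := rfl
    rw [← h2, hkeys]; exact hnodup)
  have hkeys2 : (mapComb dB).keys = (mapComb dB).items.map Prod.fst := rfl
  rw [hkeys2, hvals]
  have hitems : (mapComb dB).items.map Prod.snd = dB.values.map acomb := by
    simp [mapComb, PySem.Dict.values]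
  rw [hitems]
  apply List.map_congr_left
  intro rows hrows
  exact acomb_eq_bcomb rows (hfold.1 rows hrows)
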